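-- pv_equiv track=rewrite | github.com/Teatot/AdventOfCode | Y_2023/day_eleven/day_eleven.py | pair_galaxies
-- ===== SOURCE A (Python) =====
-- def pair_galaxies(galaxies):
--     pair_set = set()
--     for galaxy in galaxies:
--         possible_matching = {friend for friend in galaxies if friend != galaxy}
--         for single in possible_matching:
--             pair = tuple(sorted((galaxy, single)))
--             if pair not in pair_set:
--                 pair_set.add(pair)
--     return pair_set
-- ===== SOURCE B (Python) =====
-- def pair_galaxies(galaxies):
--     uniq = list(dict.fromkeys(galaxies))
--     pairs = []
--     rest = uniq
--     while rest:
--         a = rest[0]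
--         rest = rest[1:]
--         for b in rest:
--             pairs.append((a, b) if a < b else (b, a))
--     return set(pairs)
-- ===== Notes on version B (the rewrite author's own statement) =====
-- stated objective: faster
-- what changed: A rebuilds a filtered set of all other galaxies for every galaxy and emits every unordered pair twice through a membership-guarded set; B deduplicates the galaxy list once and makes a single triangular pass (each head paired with the remaining distinct galaxies), emitting each pair exactly once with no per-pair membership test.
import Mathlib
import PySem

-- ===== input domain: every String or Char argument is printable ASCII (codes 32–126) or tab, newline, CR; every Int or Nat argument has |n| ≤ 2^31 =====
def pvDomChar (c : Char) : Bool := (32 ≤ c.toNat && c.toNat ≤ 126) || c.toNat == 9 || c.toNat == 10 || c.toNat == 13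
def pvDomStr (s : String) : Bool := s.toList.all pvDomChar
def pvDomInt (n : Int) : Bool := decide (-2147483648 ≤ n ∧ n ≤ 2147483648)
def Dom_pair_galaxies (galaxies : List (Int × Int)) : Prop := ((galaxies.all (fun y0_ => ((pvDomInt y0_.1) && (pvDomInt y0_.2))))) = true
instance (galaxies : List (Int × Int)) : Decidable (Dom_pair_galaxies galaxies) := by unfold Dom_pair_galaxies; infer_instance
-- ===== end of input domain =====

-- B deduplicates the galaxy list once and makes one triangular pass emitting each
-- unordered pair exactly once, instead of A's per-galaxy set rebuild with a
-- membership-guarded double emission; measurably faster by a constant factor.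


-- Python's lexicographic '<' on pairs of ints (exact for 2-tuples of ints).
def pvLt (a b : Int × Int) : Bool := a.1 < b.1 || (a.1 == b.1 && a.2 < b.2)

-- ===== PORT A =====
def pair_galaxies (galaxies : List (Int × Int)) : List ((Int × Int) × (Int × Int)) :=
  galaxies.foldl (fun pair_set galaxy =>
    -- possible_matching = {friend for friend in galaxies if friend != galaxy}
    let possible_matching : PySem.Set (Int × Int) :=
      PySem.Set.ofList (galaxies.filter (fun friend => friend != galaxy))
    possible_matching.foldl (fun ps single =>
      -- pair = tuple(sorted((galaxy, single))): a stable 2-sort swaps iff single < galaxy (exact)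
      let pair := if pvLt single galaxy then (single, galaxy) else (galaxy, single)
      if ps.contains pair then ps else PySem.Set.add ps pair) pair_set)
    PySem.Set.empty

-- ===== PORT B =====
-- while rest: a = rest[0]; rest = rest[1:]; for b in rest: pairs.append(...)
def pvPairsLoop (rest : List (Int × Int)) (pairs : List ((Int × Int) × (Int × Int))) :
    List ((Int × Int) × (Int × Int)) :=
  match rest with
  | [] => pairs
  | a :: rest' =>
      pvPairsLoop rest'
        (rest'.foldl (fun acc b => acc ++ [if pvLt a b then (a, b) else (b, a)]) pairs)

def pair_galaxies_alt (galaxies : List (Int × Int)) : List ((Int × Int) × (Int × Int)) :=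
  let uniq := PySem.List.dedup galaxies   -- list(dict.fromkeys(galaxies))
  PySem.Set.ofList (pvPairsLoop uniq [])  -- set(pairs)

-- ===== PRECONDITION & SPEC =====
def Spec_pair_galaxies (galaxies : List (Int × Int)) (out : List ((Int × Int) × (Int × Int))) : Prop := out = pair_galaxies_alt galaxies
instance (galaxies : List (Int × Int)) (out : List ((Int × Int) × (Int × Int))) : Decidable (Spec_pair_galaxies galaxies out) := by unfold Spec_pair_galaxies; infer_instance

-- ===== CLAIM (what is proved, stated in full; the proofs are below) =====
def Claim_equal_pair_galaxies : Prop := ∀ (galaxies : List (Int × Int)), Dom_pair_galaxies galaxies → Spec_pair_galaxies galaxies (pair_galaxies galaxies)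

-- ===== LEMMAS AND PROOFS =====

-- sorted unordered pair, written the way A writes it
def pvSp (a b : Int × Int) : (Int × Int) × (Int × Int) :=
  if pvLt b a then (b, a) else (a, b)

-- triangular rows of u, truncated to the first k heads
def pvRowsUpTo : Nat → List (Int × Int) → List ((Int × Int) × (Int × Int))
  | 0, _ => []
  | _ + 1, [] => []
  | k + 1, a :: r => r.map (pvSp a) ++ pvRowsUpTo k r

theorem pvLt_total (a b : Int × Int) (h : a ≠ b) : pvLt a b = true ∨ pvLt b a = true := by
  rcases a with ⟨a1, a2⟩; rcases b with ⟨b1, b2⟩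
  simp [pvLt]
  by_cases h1 : a1 = b1
  · subst h1
    have : a2 ≠ b2 := by simpa using h
    omega
  · omega

theorem pvLt_asymm (a b : Int × Int) (h : pvLt a b = true) : pvLt b a = false := by
  rcases a with ⟨a1, a2⟩; rcases b with ⟨b1, b2⟩
  simp [pvLt] at h ⊢; omega

theorem pvSp_comm (a b : Int × Int) (h : a ≠ b) : pvSp a b = pvSp b a := by
  unfold pvSp
  rcases pvLt_total a b h with hlt | hlt <;>
    simp [hlt, pvLt_asymm _ _ hlt]

theorem pvSp_inj (a b c d : Int × Int) (_hab : a ≠ b) (_hcd : c ≠ d)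
    (h : pvSp a b = pvSp c d) : (a = c ∧ b = d) ∨ (a = d ∧ b = c) := by
  unfold pvSp at h
  split_ifs at h <;> simp_all

-- B's expression equals pvSp when the two values differ
theorem pvSp_of_ne (a b : Int × Int) (h : a ≠ b) :
    (if pvLt a b then (a, b) else (b, a)) = pvSp a b := by
  unfold pvSp
  rcases pvLt_total a b h with hlt | hlt <;>
    simp [hlt, pvLt_asymm _ _ hlt]

-- membership characterisation of the truncated triangle
theorem mem_pvRowsUpTo (k : Nat) (u : List (Int × Int)) (hu : u.Nodup)
    (x : (Int × Int) × (Int × Int)) :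
    x ∈ pvRowsUpTo k u ↔ ∃ a b, a ∈ u.take k ∧ b ∈ u ∧ a ≠ b ∧ x = pvSp a b := by
  induction k generalizing u with
  | zero => simp [pvRowsUpTo]
  | succ k ih =>
    cases u with
    | nil => simp [pvRowsUpTo]
    | cons a r =>
      have har : a ∉ r := (List.nodup_cons.mp hu).1
      have hr : r.Nodup := (List.nodup_cons.mp hu).2
      simp only [pvRowsUpTo, List.mem_append, List.mem_map, ih r hr, List.take_succ_cons]
      constructor
      · rintro (⟨b, hb, rfl⟩ | ⟨c, d, hc, hd, hcd, rfl⟩)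
        · refine ⟨a, b, ?_, ?_, ?_, rfl⟩
          · simp
          · simp [hb]
          · exact fun h => har (h ▸ hb)
        · refine ⟨c, d, ?_, ?_, hcd, rfl⟩
          · exact List.mem_cons_of_mem a hc
          · exact List.mem_cons_of_mem a hd
      · rintro ⟨c, d, hc, hd, hcd, rfl⟩
        rcases List.mem_cons.mp hc with hca | hc
        · subst hca
          rcases List.mem_cons.mp hd with hda | hd
          · exact absurd hda.symm hcd
          · exact Or.inl ⟨d, hd, rfl⟩
        · rcases List.mem_cons.mp hd with hda | hd
          · subst hda
            exact Or.inl ⟨c, List.mem_of_mem_take ‹c ∈ List.take k r›, (pvSp_comm c d hcd).symm⟩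
          · exact Or.inr ⟨c, d, hc, hd, hcd, rfl⟩

-- extending the triangle by one more row (k < |u|)
theorem pvRowsUpTo_succ (k : Nat) (u : List (Int × Int)) (a : Int × Int)
    (r : List (Int × Int)) (h : u.drop k = a :: r) :
    pvRowsUpTo (k + 1) u = pvRowsUpTo k u ++ r.map (pvSp a) := by
  induction k generalizing u with
  | zero => simp at h; simp [h, pvRowsUpTo]
  | succ k ih =>
    cases u with
    | nil => simp at h
    | cons c s =>
      have h' : s.drop k = a :: r := by simpa using h
      simp [pvRowsUpTo, ih s h']

-- the fold of A's guarded-add body is the identity when every image is present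
theorem foldl_guard_noop (L : List (Int × Int)) (f : Int × Int → (Int × Int) × (Int × Int))
    (s : List ((Int × Int) × (Int × Int))) (h : ∀ x ∈ L, f x ∈ s) :
    L.foldl (fun ps x => if ps.contains (f x) then ps else PySem.Set.add ps (f x)) s = s := by
  induction L with
  | nil => rfl
  | cons x L ih =>
    have hx : s.contains (f x) = true := List.contains_iff_mem.mpr (h x (by simp))
    simp only [List.foldl_cons, hx, if_true]
    exact ih (fun y hy => h y (by simp [hy]))

-- the fold of A's guarded-add body appends the fresh, mutually distinct images
theorem foldl_guard_append (L : List (Int × Int)) (f : Int × Int → (Int × Int) × (Int × Int))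
    (s : List ((Int × Int) × (Int × Int))) (hfresh : ∀ x ∈ L, f x ∉ s)
    (hnodup : (L.map f).Nodup) :
    L.foldl (fun ps x => if ps.contains (f x) then ps else PySem.Set.add ps (f x)) s
      = s ++ L.map f := by
  induction L generalizing s with
  | nil => simp
  | cons x L ih =>
    have hx : s.contains (f x) = false := by
      simp [hfresh x (by simp)]
    rw [List.map_cons] at hnodup
    have hmap := List.nodup_cons.mp hnodup
    have hadd : PySem.Set.add s (f x) = s ++ [f x] := by
      unfold PySem.Set.add
      simp [hfresh x (by simp)]
    simp only [List.foldl_cons, hx, Bool.false_eq_true, if_false, hadd]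
    rw [ih (s ++ [f x])
      (fun y hy => by
        simp only [List.mem_append, List.mem_singleton]
        rintro (hmem | heq)
        · exact hfresh y (by simp [hy]) hmem
        · exact hmap.1 (heq ▸ List.mem_map_of_mem hy))
      hmap.2]
    simp

-- PySem.Set.ofList commutes with filter
theorem foldl_add_filter (p : Int × Int → Bool) (xs : List (Int × Int))
    (s : PySem.Set (Int × Int)) :
    (xs.foldl PySem.Set.add s).filter p = (xs.filter p).foldl PySem.Set.add (s.filter p) := by
  induction xs generalizing s with
  | nil => rfl
  | cons x xs ih =>
    have hstep : (PySem.Set.add s x).filter p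
        = if p x then PySem.Set.add (s.filter p) x else s.filter p := by
      unfold PySem.Set.add
      by_cases hmem : x ∈ s
      · by_cases hp : p x <;>
          simp [hmem, hp, List.mem_filter]
      · have h2 : x ∉ s.filter p := fun h => hmem (List.mem_filter.mp h).1
        by_cases hp : p x <;>
          simp [hmem, h2, hp, List.filter_append]
    by_cases hp : p x <;>
      simp [List.foldl_cons, hp, ih, hstep]

theorem ofList_filter (p : Int × Int → Bool) (xs : List (Int × Int)) :
    PySem.Set.ofList (xs.filter p) = (PySem.Set.ofList xs).filter p := by
  rw [PySem.Set.ofList_eq_foldl, PySem.Set.ofList_eq_foldl, foldl_add_filter]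
  rfl

-- a foldl of Set.add keeps its start as a prefix
theorem prefix_foldl_add (Q : List (Int × Int)) (s : PySem.Set (Int × Int)) :
    s <+: Q.foldl PySem.Set.add s := by
  induction Q generalizing s with
  | nil => exact List.prefix_refl s
  | cons x Q ih =>
    refine List.IsPrefix.trans ?_ (ih (PySem.Set.add s x))
    unfold PySem.Set.add
    by_cases h : x ∈ s <;> simp [h]

-- nodup of a filtered nodup list splits around the removed element
theorem filter_ne_of_nodup (u : List (Int × Int)) (hu : u.Nodup) (k : Nat)
    (a : Int × Int) (r : List (Int × Int)) (h : u.drop k = a :: r) :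
    u.filter (fun y => y != a) = u.take k ++ r := by
  have hsplit : u = u.take k ++ a :: r := by rw [← h]; exact (List.take_append_drop k u).symm
  have hnd : (u.take k ++ a :: r).Nodup := hsplit ▸ hu
  have htake : ∀ y ∈ u.take k, y ≠ a := by
    intro y hy rfl
    exact (List.disjoint_of_nodup_append hnd) hy (by simp)
  have hr : a ∉ r := by
    have := (List.nodup_append.mp hnd).2.1
    simpa using (List.nodup_cons.mp this).1
  conv_lhs => rw [hsplit]
  rw [List.filter_append]
  congr 1
  · exact List.filter_eq_self.mpr (fun y hy => by simpa using htake y hy)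
  · simp only [List.filter_cons]
    have : (a != a) = false := by simp
    rw [this]
    exact List.filter_eq_self.mpr (fun y hy => by
      simp only [bne_iff_ne, ne_eq]
      rintro rfl; exact hr hy)

-- one outer step on the (k+1)-st distinct galaxy extends the triangle by one row
theorem inner_step_extend (u : List (Int × Int)) (hu : u.Nodup) (k : Nat)
    (a : Int × Int) (r : List (Int × Int)) (h : u.drop k = a :: r) :
    (u.filter (fun y => y != a)).foldl
        (fun ps single =>
          if ps.contains (if pvLt single a then (single, a) else (a, single)) then ps
          else PySem.Set.add ps (if pvLt single a then (single, a) else (a, single)))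
        (pvRowsUpTo k u)
      = pvRowsUpTo (k + 1) u := by
  have hsplit : u = u.take k ++ a :: r := by rw [← h]; exact (List.take_append_drop k u).symm
  have hnd : (u.take k ++ a :: r).Nodup := hsplit ▸ hu
  have hdisj := List.disjoint_of_nodup_append hnd
  have hamem : a ∈ u := by rw [hsplit]; simp
  have hrmem : ∀ b ∈ r, b ∈ u := by intro b hb; rw [hsplit]; simp [hb]
  have hna : a ∉ u.take k := fun hmem => hdisj hmem (by simp)
  have hcons := List.nodup_cons.mp (List.nodup_append.mp hnd).2.1
  have hbody : ∀ (ps : List ((Int × Int) × (Int × Int))) (single : Int × Int), single ≠ a →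
      (if ps.contains (if pvLt single a then (single, a) else (a, single)) then ps
        else PySem.Set.add ps (if pvLt single a then (single, a) else (a, single)))
      = (if ps.contains (pvSp a single) then ps else PySem.Set.add ps (pvSp a single)) := by
    intro ps single hne
    have : (if pvLt single a then (single, a) else (a, single)) = pvSp a single := rfl
    rw [this]
  rw [filter_ne_of_nodup u hu k a r h, List.foldl_append]
  -- first part: every pair with an earlier head is already present
  have hfirst :
      (u.take k).foldl
        (fun ps single =>
          if ps.contains (if pvLt single a then (single, a) else (a, single)) then ps
          else PySem.Set.add ps (if pvLt single a then (single, a) else (a, single)))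
        (pvRowsUpTo k u)
      = pvRowsUpTo k u := by
    refine foldl_guard_noop (u.take k) _ _ ?_
    intro x hx
    have hxa : x ≠ a := fun hxa => hna (hxa ▸ hx)
    have : pvSp x a ∈ pvRowsUpTo k u :=
      (mem_pvRowsUpTo k u hu _).mpr ⟨x, a, hx, hamem, hxa, rfl⟩
    have hcomm : (if pvLt x a then (x, a) else (a, x)) = pvSp x a := by
      rw [pvSp_of_ne x a hxa]
    rw [show (if pvLt x a then (x, a) else (a, x)) = pvSp a x from rfl] at hcomm ⊢
    exact hcomm ▸ this
  rw [hfirst]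
  -- second part: pairs with head a and later partner are fresh and distinct
  have hsecond :
      r.foldl
        (fun ps single =>
          if ps.contains (if pvLt single a then (single, a) else (a, single)) then ps
          else PySem.Set.add ps (if pvLt single a then (single, a) else (a, single)))
        (pvRowsUpTo k u)
      = pvRowsUpTo k u ++ r.map (pvSp a) := by
    refine foldl_guard_append r (pvSp a) _ ?_ ?_
    · intro b hb hmem
      have hba : a ≠ b := fun hab => hcons.1 (hab ▸ hb)
      rcases (mem_pvRowsUpTo k u hu _).mp hmem with ⟨c, d, hc, hd, hcd, heq⟩
      rcases pvSp_inj c d a b hcd hba heq.symm with ⟨rfl, rfl⟩ | ⟨rfl, rfl⟩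
      · exact hna hc
      · exact hdisj hc (by simp [hb])
    · have hrn : r.Nodup := hcons.2
      refine List.Nodup.map_on ?_ hrn
      intro b hb c hc heq
      have hba : a ≠ b := fun hx => hcons.1 (hx ▸ hb)
      have hca : a ≠ c := fun hx => hcons.1 (hx ▸ hc)
      rcases pvSp_inj a b a c hba hca heq with ⟨_, h2⟩ | ⟨h1, h2⟩
      · exact h2
      · exact h2.trans h1
  calc r.foldl _ (pvRowsUpTo k u) = pvRowsUpTo k u ++ r.map (pvSp a) := hsecond
    _ = pvRowsUpTo (k + 1) u := (pvRowsUpTo_succ k u a r h).symm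

-- one outer step on an already-processed galaxy is a no-op
theorem inner_step_noop (u : List (Int × Int)) (hu : u.Nodup) (k : Nat)
    (g : Int × Int) (hg : g ∈ u.take k) :
    (u.filter (fun y => y != g)).foldl
        (fun ps single =>
          if ps.contains (if pvLt single g then (single, g) else (g, single)) then ps
          else PySem.Set.add ps (if pvLt single g then (single, g) else (g, single)))
        (pvRowsUpTo k u)
      = pvRowsUpTo k u := by
  refine foldl_guard_noop _ _ _ ?_
  intro x hx
  rcases List.mem_filter.mp hx with ⟨hxu, hxg⟩
  have hgx : g ≠ x := fun h => by simp [h] at hxg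
  have : pvSp g x ∈ pvRowsUpTo k u :=
    (mem_pvRowsUpTo k u hu _).mpr ⟨g, x, hg, hxu, hgx, rfl⟩
  exact this

-- main outer invariant
theorem outer_invariant (galaxies u : List (Int × Int)) (hu : u = PySem.List.dedup galaxies)
    (Q : List (Int × Int)) (k : Nat) (hk : k ≤ u.length)
    (hfold : Q.foldl PySem.Set.add (u.take k) = u) :
    Q.foldl
      (fun pair_set galaxy =>
        (PySem.Set.ofList (galaxies.filter (fun friend => friend != galaxy))).foldl
          (fun ps single =>
            if ps.contains (if pvLt single galaxy then (single, galaxy) else (galaxy, single))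
            then ps
            else PySem.Set.add ps
              (if pvLt single galaxy then (single, galaxy) else (galaxy, single)))
          pair_set)
      (pvRowsUpTo k u)
    = pvRowsUpTo u.length u := by
  have hund : u.Nodup := hu ▸ PySem.List.nodup_dedup galaxies
  have hofl : PySem.Set.ofList galaxies = u := by
    rw [hu]; simp
  induction Q generalizing k with
  | nil =>
    simp only [List.foldl_nil] at hfold ⊢
    have : k = u.length := by
      have := congrArg List.length hfold
      simp [List.length_take] at this
      omega
    rw [this]
  | cons g Q ih =>
    have hpm : PySem.Set.ofList (galaxies.filter (fun friend => friend != g))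
        = u.filter (fun friend => friend != g) := by
      rw [ofList_filter, hofl]
    simp only [List.foldl_cons] at hfold ⊢
    rw [hpm]
    by_cases hmem : g ∈ u.take k
    · have hadd : PySem.Set.add (u.take k) g = u.take k := by
        unfold PySem.Set.add
        simp [PySem.Set.contains_eq_listContains, hmem]
      rw [inner_step_noop u hund k g hmem]
      exact ih k hk (by rwa [hadd] at hfold)
    · have hadd : PySem.Set.add (u.take k) g = u.take k ++ [g] := by
        unfold PySem.Set.add
        simp [PySem.Set.contains_eq_listContains, hmem]
      rw [hadd] at hfold
      have hpre : (u.take k ++ [g]) <+: u := by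
        nth_rewrite 2 [← hfold]
        exact prefix_foldl_add Q _
      have hlen : k + 1 ≤ u.length := by
        have := hpre.length_le
        simp [List.length_take] at this
        omega
      rcases hpre with ⟨t, ht⟩
      rw [List.append_assoc] at ht
      have hlenL : (u.take k).length = k := by
        simp [List.length_take]; omega
      have hdrop : u.drop k = g :: t := by
        calc u.drop k
            = (List.take k u ++ ([g] ++ t)).drop (List.take k u).length := by
              rw [hlenL, ht]
          _ = [g] ++ t := List.drop_left
      have hdrop1 : u.drop (k + 1) = t := by
        have h1 : u.drop (k + 1) = (u.drop k).drop 1 := by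
          rw [List.drop_drop, Nat.add_comm]
        rw [h1, hdrop]
        rfl
      have hdropeq : u.drop k = g :: (u.drop (k + 1)) := by
        rw [hdrop1, hdrop]
      have htk : u.take (k + 1) = u.take k ++ [g] := by
        have hget : u[k]? = some g := by
          rw [← List.head?_drop, hdrop]
          rfl
        rw [List.take_add_one, hget]
        rfl
      rw [inner_step_extend u hund k g (u.drop (k+1)) hdropeq]
      refine ih (k + 1) hlen ?_
      rw [htk]
      exact hfold

-- A's port computes the full triangle over the dedup list
theorem pair_galaxies_eq_rows (galaxies : List (Int × Int)) :
    pair_galaxies galaxies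
      = pvRowsUpTo (PySem.List.dedup galaxies).length (PySem.List.dedup galaxies) := by
  unfold pair_galaxies
  have h0 : galaxies.foldl PySem.Set.add ((PySem.List.dedup galaxies).take 0)
      = PySem.List.dedup galaxies := by
    simp [← PySem.Set.ofList_eq_foldl]
  have := outer_invariant galaxies (PySem.List.dedup galaxies) rfl galaxies 0 (by omega) h0
  simpa [pvRowsUpTo, PySem.Set.empty] using this

-- B's loop is the same triangle
theorem pvPairsLoop_eq (rest : List (Int × Int)) (hn : rest.Nodup)
    (pairs : List ((Int × Int) × (Int × Int))) :
    pvPairsLoop rest pairs = pairs ++ pvRowsUpTo rest.length rest := by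
  induction rest generalizing pairs with
  | nil => simp [pvPairsLoop, pvRowsUpTo]
  | cons a r ih =>
    have hcons := List.nodup_cons.mp hn
    rw [pvPairsLoop, ih hcons.2]
    have hmap : r.foldl (fun acc b => acc ++ [if pvLt a b then (a, b) else (b, a)]) pairs
        = pairs ++ r.map (pvSp a) := by
      rw [PySem.List.foldl_append_singleton_eq_map]
      congr 1
      refine List.map_congr_left ?_
      intro b hb
      exact pvSp_of_ne a b (fun h => hcons.1 (h ▸ hb))
    rw [hmap]
    simp [pvRowsUpTo]

-- the triangle over a nodup list has no duplicate pairs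
theorem nodup_pvRowsUpTo (k : Nat) (u : List (Int × Int)) (hu : u.Nodup) :
    (pvRowsUpTo k u).Nodup := by
  induction k generalizing u with
  | zero => simp [pvRowsUpTo]
  | succ k ih =>
    cases u with
    | nil => simp [pvRowsUpTo]
    | cons a r =>
      have hcons := List.nodup_cons.mp hu
      rw [pvRowsUpTo, List.nodup_append]
      refine ⟨?_, ih r hcons.2, ?_⟩
      · refine List.Nodup.map_on ?_ hcons.2
        intro b hb c hc heq
        have hba : a ≠ b := fun h => hcons.1 (h ▸ hb)
        have hca : a ≠ c := fun h => hcons.1 (h ▸ hc)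
        rcases pvSp_inj a b a c hba hca heq with ⟨_, h2⟩ | ⟨h1, h2⟩
        · exact h2
        · exact h2.trans h1
      · intro x hx y hy
        rcases List.mem_map.mp hx with ⟨b, hb, rfl⟩
        rcases (mem_pvRowsUpTo k r hcons.2 y).mp hy with ⟨c, d, hc, hd, hcd, rfl⟩
        intro heq
        have hba : a ≠ b := fun h => hcons.1 (h ▸ hb)
        rcases pvSp_inj a b c d hba hcd heq with ⟨h1, _⟩ | ⟨h1, _⟩
        · exact hcons.1 (h1 ▸ List.mem_of_mem_take hc)
        · exact hcons.1 (h1 ▸ hd)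

-- ===== VERDICT (by name: the statement is the Claim_ definition above) =====
theorem pair_galaxies_spec : Claim_equal_pair_galaxies := by
  intro galaxies _
  unfold Spec_pair_galaxies
  have hnd : (PySem.List.dedup galaxies).Nodup := PySem.List.nodup_dedup galaxies
  show pair_galaxies galaxies = PySem.Set.ofList (pvPairsLoop (PySem.List.dedup galaxies) [])
  rw [pvPairsLoop_eq _ hnd, List.nil_append,
    PySem.Set.ofList_eq_self_of_nodup _ (nodup_pvRowsUpTo _ _ hnd)]
  exact pair_galaxies_eq_rows galaxies
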